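-- pv_equiv track=rewrite | github.com/seifreed/yaraast | yaraast/lsp/authoring_support.py | normalize_modifiers
-- ===== SOURCE A (Python) =====
-- PREFERRED_MODIFIER_ORDER = [
--     "ascii",
--     "wide",
--     "nocase",
--     "fullword",
--     "xor",
--     "base64",
--     "base64wide",
--     "private",
-- ]
--
-- def normalize_modifiers(modifiers: list[str]) -> list[str]:
--     seen: set[str] = set()
--     unique: list[str] = []
--     for modifier in modifiers:
--         if modifier not in seen:
--             unique.append(modifier)
--             seen.add(modifier)
--     order = {name: idx for idx, name in enumerate(PREFERRED_MODIFIER_ORDER)}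
--     return sorted(unique, key=lambda item: (order.get(item, len(order)), item))
-- ===== SOURCE B (Python) =====
-- PREFERRED_MODIFIER_ORDER = [
--     "ascii",
--     "wide",
--     "nocase",
--     "fullword",
--     "xor",
--     "base64",
--     "base64wide",
--     "private",
-- ]
--
-- def normalize_modifiers(modifiers: list[str]) -> list[str]:
--     present = set(modifiers)
--     known = [name for name in PREFERRED_MODIFIER_ORDER if name in present]
--     unknown = sorted(m for m in present if m not in PREFERRED_MODIFIER_ORDER)
--     return known + unknown
-- ===== Notes on version B (the rewrite author's own statement) =====
-- stated objective: alternative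
-- what changed: Instead of one stable sort of the deduped list under the composite key (preferred-index, name), B scans the fixed preferred table emitting the known modifiers in table order and separately sorts only the unknown modifiers alphabetically, appending them after.
import Mathlib
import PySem

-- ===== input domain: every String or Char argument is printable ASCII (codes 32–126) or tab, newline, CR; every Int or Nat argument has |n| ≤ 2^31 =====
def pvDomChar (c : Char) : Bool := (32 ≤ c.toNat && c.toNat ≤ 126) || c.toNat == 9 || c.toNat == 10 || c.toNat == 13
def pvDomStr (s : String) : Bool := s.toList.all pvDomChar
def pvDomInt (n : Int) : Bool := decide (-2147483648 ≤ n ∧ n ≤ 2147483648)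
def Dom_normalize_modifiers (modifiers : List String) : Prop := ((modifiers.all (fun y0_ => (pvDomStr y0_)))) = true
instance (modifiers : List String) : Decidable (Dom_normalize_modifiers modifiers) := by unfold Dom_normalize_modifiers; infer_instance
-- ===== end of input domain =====

-- B replaces A's single key-based sort of the deduped modifiers by a scan of the fixed preferred
-- table (emitting the known names in table order) followed by an alphabetical sort of only the
-- unknown names, appended after (objective: alternative).

def PREFERRED_MODIFIER_ORDER : List String :=
  ["ascii", "wide", "nocase", "fullword", "xor", "base64", "base64wide", "private"]

-- ===== PORT A =====
def normalize_modifiers (modifiers : List String) : List String :=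
  let st := modifiers.foldl
    (fun (st : PySem.Set String × List String) modifier =>
      if PySem.Set.contains st.1 modifier then st
      else (PySem.Set.add st.1 modifier, st.2 ++ [modifier]))
    (PySem.Set.empty, [])
  let unique := st.2
  let order : PySem.Dict String Int :=
    (PySem.List.enumerate PREFERRED_MODIFIER_ORDER).foldl
      (fun d p => PySem.Dict.insert d p.2 p.1) PySem.Dict.empty
  PySem.List.sorted2 unique
    (fun item => PySem.Dict.getD order item ((order.items.length : Nat) : Int))
    (fun item => item) false

-- ===== PORT B =====
def normalize_modifiers_alt (modifiers : List String) : List String :=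
  let present : PySem.Set String := PySem.Set.ofList modifiers
  let known := PREFERRED_MODIFIER_ORDER.filter (fun name => PySem.Set.contains present name)
  let unknown := PySem.List.sorted
    (present.filter (fun m => !(PREFERRED_MODIFIER_ORDER.contains m)))
    (fun x => x) false
  known ++ unknown

-- ===== PRECONDITION & SPEC =====
def Spec_normalize_modifiers (modifiers : List String) (out : List String) : Prop := out = normalize_modifiers_alt modifiers
instance (modifiers : List String) (out : List String) : Decidable (Spec_normalize_modifiers modifiers out) := by unfold Spec_normalize_modifiers; infer_instance

-- ===== CLAIM (what is proved, stated in full; the proofs are below) =====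
def Claim_equal_normalize_modifiers : Prop := ∀ (modifiers : List String), Dom_normalize_modifiers modifiers → Spec_normalize_modifiers modifiers (normalize_modifiers modifiers)

-- ===== LEMMAS AND PROOFS =====

-- A's order dict, as the closed term the port builds.
def orderDict : PySem.Dict String Int :=
  (PySem.List.enumerate PREFERRED_MODIFIER_ORDER).foldl
    (fun d p => PySem.Dict.insert d p.2 p.1) PySem.Dict.empty

-- A's sort key (order.get(item, len(order)), item), seen as one lexicographic key.
def lexKey (x : String) : Int ×ₗ String :=
  toLex (PySem.Dict.getD orderDict x ((orderDict.items.length : Nat) : Int), x)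

-- A's dedup loop keeps its two components equal: seen (as a PySem.Set) and unique coincide.
lemma dedup_loop_eq (xs : List String) (s : List String) :
    xs.foldl
      (fun (st : PySem.Set String × List String) modifier =>
        if PySem.Set.contains st.1 modifier then st
        else (PySem.Set.add st.1 modifier, st.2 ++ [modifier]))
      (s, s)
    = (xs.foldl PySem.Set.add s, xs.foldl PySem.Set.add s) := by
  induction xs generalizing s with
  | nil => rfl
  | cons x t ih =>
    simp only [List.foldl_cons]
    by_cases h : PySem.Set.contains s x
    · have hm : x ∈ s := by simpa [PySem.Set.contains] using h
      have ha : PySem.Set.add s x = s := by simp [PySem.Set.add, PySem.Set.contains, hm]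
      rw [if_pos h, ha]
      exact ih s
    · have hm : x ∉ s := by simpa [PySem.Set.contains] using h
      have ha : PySem.Set.add s x = s ++ [x] := by simp [PySem.Set.add, PySem.Set.contains, hm]
      rw [if_neg h, ha]
      exact ih (s ++ [x])

-- sorted2 with keys (k1, id) is sorted with the single lexicographic pair key.
lemma sorted2_eq_sorted_lex (xs : List String) (k1 : String → Int) :
    PySem.List.sorted2 xs k1 (fun x => x) false
      = PySem.List.sorted xs (fun x => toLex (k1 x, x)) false := by
  rw [PySem.List.sorted_eq_foldl_insertBy]
  show List.foldl _ [] xs = List.foldl _ [] xs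
  congr 1
  funext acc x
  congr 1
  funext a b
  rcases lt_trichotomy (k1 a) (k1 b) with h | h | h
  · simp [Prod.Lex.toLex_lt_toLex, h, not_lt_of_gt h]
  · simp [Prod.Lex.toLex_lt_toLex, h]
  · simp [Prod.Lex.toLex_lt_toLex, h, not_lt_of_gt h, ne_of_gt h]

lemma getD_of_not_pref (x : String) (hx : PREFERRED_MODIFIER_ORDER.contains x = false) :
    PySem.Dict.getD orderDict x ((orderDict.items.length : Nat) : Int) = 8 := by
  simp [PREFERRED_MODIFIER_ORDER] at hx
  obtain ⟨h1, h2, h3, h4, h5, h6, h7, h8⟩ := hx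
  have g1 : ("ascii" == x) = false := beq_eq_false_iff_ne.mpr (fun h => h1 h.symm)
  have g2 : ("wide" == x) = false := beq_eq_false_iff_ne.mpr (fun h => h2 h.symm)
  have g3 : ("nocase" == x) = false := beq_eq_false_iff_ne.mpr (fun h => h3 h.symm)
  have g4 : ("fullword" == x) = false := beq_eq_false_iff_ne.mpr (fun h => h4 h.symm)
  have g5 : ("xor" == x) = false := beq_eq_false_iff_ne.mpr (fun h => h5 h.symm)
  have g6 : ("base64" == x) = false := beq_eq_false_iff_ne.mpr (fun h => h6 h.symm)
  have g7 : ("base64wide" == x) = false := beq_eq_false_iff_ne.mpr (fun h => h7 h.symm)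
  have g8 : ("private" == x) = false := beq_eq_false_iff_ne.mpr (fun h => h8 h.symm)
  simp [orderDict, PREFERRED_MODIFIER_ORDER, PySem.List.enumerate, PySem.Dict.insert,
        PySem.Dict.empty, PySem.Dict.getD, PySem.Dict.get?, List.find?, beq_iff_eq,
        g1, g2, g3, g4, g5, g6, g7, g8]

lemma getD_lt_of_pref (x : String) (hx : x ∈ PREFERRED_MODIFIER_ORDER) :
    PySem.Dict.getD orderDict x ((orderDict.items.length : Nat) : Int) < 8 := by
  simp [PREFERRED_MODIFIER_ORDER] at hx
  rcases hx with h | h | h | h | h | h | h | h <;> subst h <;> decide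

lemma pref_pairwise :
    List.Pairwise (fun a b => lexKey a < lexKey b) PREFERRED_MODIFIER_ORDER := by
  decide

lemma pref_nodup : PREFERRED_MODIFIER_ORDER.Nodup := by decide

lemma main_eq (modifiers : List String) :
    normalize_modifiers modifiers = normalize_modifiers_alt modifiers := by
  have hfold : (modifiers.foldl
      (fun (st : PySem.Set String × List String) modifier =>
        if PySem.Set.contains st.1 modifier then st
        else (PySem.Set.add st.1 modifier, st.2 ++ [modifier]))
      (PySem.Set.empty, [])).2 = PySem.Set.ofList modifiers := by
    rw [show (PySem.Set.empty, ([] : List String))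
          = (([] : List String), ([] : List String)) from rfl,
        dedup_loop_eq, PySem.Set.ofList_eq_foldl]
  simp only [normalize_modifiers, normalize_modifiers_alt]
  rw [hfold, sorted2_eq_sorted_lex]
  set u := PySem.Set.ofList modifiers with hu
  have hnodup : u.Nodup := PySem.Set.nodup_ofList modifiers
  set known := PREFERRED_MODIFIER_ORDER.filter (fun name => PySem.Set.contains u name) with hknown
  set unknown := PySem.List.sorted
      (u.filter (fun m => !(PREFERRED_MODIFIER_ORDER.contains m))) (fun x => x) false with hunk
  apply PySem.List.sorted_eq_of_perm_of_pairwise_lt u (known ++ unknown) lexKey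
  · -- permutation
    have hperm1 : unknown.Perm (u.filter (fun m => !(PREFERRED_MODIFIER_ORDER.contains m))) :=
      PySem.List.sorted_perm _ _ _
    have hperm2 : known.Perm (u.filter (fun m => PREFERRED_MODIFIER_ORDER.contains m)) := by
      rw [List.perm_ext_iff_of_nodup (pref_nodup.filter _) (hnodup.filter _)]
      intro a
      simp only [List.mem_filter, PySem.Set.contains]
      constructor
      · rintro ⟨h1, h2⟩; exact ⟨by simpa using h2, by simpa using h1⟩
      · rintro ⟨h1, h2⟩; exact ⟨by simpa using h2, by simpa using h1⟩
    exact (hperm2.append hperm1).trans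
      (List.filter_append_perm (fun m => PREFERRED_MODIFIER_ORDER.contains m) u)
  · -- pairwise strictly increasing lexicographic key
    rw [List.pairwise_append]
    refine ⟨pref_pairwise.filter _, ?_, ?_⟩
    · -- unknown part: equal first components (8), strictly increasing strings
      have hle : List.Pairwise (fun a b : String => a ≤ b) unknown :=
        PySem.List.sorted_pairwise _ _
      have hnd : unknown.Nodup :=
        ((PySem.List.sorted_perm _ _ _).nodup_iff).mpr (hnodup.filter _)
      have hstr : List.Pairwise (fun a b : String => a < b) unknown :=
        (hle.and hnd).imp (fun h => lt_of_le_of_ne h.1 h.2)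
      refine hstr.imp_of_mem ?_
      intro a b ha hb hab
      have hma : PREFERRED_MODIFIER_ORDER.contains a = false := by
        have := (List.mem_filter.mp ((PySem.List.mem_sorted _ _ _ _).mp ha)).2
        simpa using this
      have hmb : PREFERRED_MODIFIER_ORDER.contains b = false := by
        have := (List.mem_filter.mp ((PySem.List.mem_sorted _ _ _ _).mp hb)).2
        simpa using this
      show lexKey a < lexKey b
      unfold lexKey
      rw [Prod.Lex.toLex_lt_toLex]
      exact Or.inr ⟨by rw [getD_of_not_pref a hma, getD_of_not_pref b hmb], hab⟩
    · -- cross part: known keys < 8 = unknown keys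
      intro a ha b hb
      have hpa : a ∈ PREFERRED_MODIFIER_ORDER := (List.mem_filter.mp ha).1
      have hmb : PREFERRED_MODIFIER_ORDER.contains b = false := by
        have := (List.mem_filter.mp ((PySem.List.mem_sorted _ _ _ _).mp hb)).2
        simpa using this
      show lexKey a < lexKey b
      unfold lexKey
      rw [Prod.Lex.toLex_lt_toLex]
      left
      rw [getD_of_not_pref b hmb]
      exact getD_lt_of_pref a hpa

-- ===== VERDICT (by name: the statement is the Claim_ definition above) =====
theorem normalize_modifiers_spec : Claim_equal_normalize_modifiers := by
  intro modifiers _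
  exact main_eq modifiers
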